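-- pv_equiv track=rewrite | github.com/IgorBekerskyy/algorithm_lab3 | clans_solution.py | form_clans
-- ===== SOURCE A (Python) =====
-- def form_clans(list_of_pairs):
--     clans = []
--     if len(list_of_pairs)!=0:
--         for pair in list_of_pairs:
--             if pair[0]==0 or pair[1]==0:
--                 continue
--             else:
--                 clans.append([pair[0], pair[1]])
--                 break
--         i = 0
--         for pair in list_of_pairs:
--             if pair[0]==0 or pair[1]==0:
--                 continue
--             if i == 0:
--                 i += 1
--                 continue
--             for clan in clans:
--                 if pair[0] in clan:
--                     clan.append(pair[1])
--                     break
--                 elif pair[1] in clan: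
--                     clan.append(pair[0])
--                     break
--                 continue
--             else:
--                 clans.append([pair[0], pair[1]])
--     return clans
-- ===== SOURCE B (Python) =====
-- def form_clans(list_of_pairs):
--     clans = []
--     pos = {}  # element -> smallest clan index containing it
--     for pair in list_of_pairs:
--         a = pair[0]
--         if a == 0:
--             continue
--         b = pair[1]
--         if b == 0:
--             continue
--         ia = pos.get(a)
--         ib = pos.get(b)
--         if ia is None and ib is None:
--             pos[a] = pos[b] = len(clans)
--             clans.append([a, b])
--         elif ib is None or (ia is not None and ia <= ib):
--             clans[ia].append(b)
--             pos[b] = ia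
--         else:
--             clans[ib].append(a)
--             pos[a] = ib
--     return clans
-- ===== Notes on version B (the rewrite author's own statement) =====
-- stated objective: alternative
-- what changed: B replaces A's two-phase loop (seed first valid pair, then rescan every clan's member list for each pair) by a single pass that keeps an element-to-smallest-clan-index dictionary, so each pair is placed with two dict lookups instead of a scan over the clans.
import Mathlib
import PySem

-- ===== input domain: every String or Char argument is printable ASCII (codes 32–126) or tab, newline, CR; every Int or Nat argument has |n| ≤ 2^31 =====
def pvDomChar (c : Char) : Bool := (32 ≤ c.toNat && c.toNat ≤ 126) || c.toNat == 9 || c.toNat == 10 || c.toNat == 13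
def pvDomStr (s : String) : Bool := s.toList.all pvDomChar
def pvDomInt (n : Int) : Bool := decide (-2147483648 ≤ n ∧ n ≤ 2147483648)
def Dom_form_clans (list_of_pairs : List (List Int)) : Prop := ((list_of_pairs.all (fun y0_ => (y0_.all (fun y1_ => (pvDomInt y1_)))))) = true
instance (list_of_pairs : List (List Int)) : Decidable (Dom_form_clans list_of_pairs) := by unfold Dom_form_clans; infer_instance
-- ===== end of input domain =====

-- B replaces A's two-phase loop that rescans every clan per pair by a single pass with an
-- element → smallest-clan-index dictionary (objective: alternative algorithm, same observed cost).

-- ===== PORT A =====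
-- inner 'for clan in clans … else' loop: first clan containing a gets b appended; within each clan
-- a is checked before b; for-else appends a fresh clan when no clan matched
def pvA_place (a b : Int) : List (List Int) → List (List Int)
  | [] => [[a, b]]
  | clan :: rest =>
    if clan.contains a then (clan ++ [b]) :: rest
    else if clan.contains b then (clan ++ [a]) :: rest
    else clan :: pvA_place a b rest

-- first loop: seed clans with the first pair whose both entries are nonzero
-- ('pair[0]==0 or pair[1]==0' short-circuits, so pair[1] is only read when pair[0] ≠ 0;
--  Pre_ guarantees the pyGet? are `some`, so the .getD 0 defaults are never the decider inside Pre_)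
def pvA_first : List (List Int) → List (List Int)
  | [] => []
  | pair :: rest =>
    let a := (PySem.List.pyGet? pair 0).getD 0
    if a == 0 then pvA_first rest
    else
      let b := (PySem.List.pyGet? pair 1).getD 0
      if b == 0 then pvA_first rest
      else [[a, b]]

-- second loop, with the counter i skipping the first valid pair (already seeded by pvA_first)
def pvA_loop (i : Int) (clans : List (List Int)) : List (List Int) → List (List Int)
  | [] => clans
  | pair :: rest =>
    let a := (PySem.List.pyGet? pair 0).getD 0
    if a == 0 then pvA_loop i clans rest
    else
      let b := (PySem.List.pyGet? pair 1).getD 0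
      if b == 0 then pvA_loop i clans rest
      else if i == 0 then pvA_loop (i + 1) clans rest
      else pvA_loop i (pvA_place a b clans) rest

def form_clans (list_of_pairs : List (List Int)) : List (List Int) :=
  if list_of_pairs.length ≠ 0 then pvA_loop 0 (pvA_first list_of_pairs) list_of_pairs
  else []

-- ===== PORT B =====
-- one fold over the pairs; pos maps each element to the smallest clan index containing it
def pvB_step (st : List (List Int) × PySem.Dict Int Nat) (pair : List Int) :
    List (List Int) × PySem.Dict Int Nat :=
  let clans := st.1
  let pos := st.2
  let a := (PySem.List.pyGet? pair 0).getD 0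
  if a == 0 then st
  else
    let b := (PySem.List.pyGet? pair 1).getD 0
    if b == 0 then st
    else
      match pos.get? a, pos.get? b with
      | none, none => (clans ++ [[a, b]], (pos.insert a clans.length).insert b clans.length)
      | some ia, none => (clans.modify ia (· ++ [b]), pos.insert b ia)
      | none, some ib => (clans.modify ib (· ++ [a]), pos.insert a ib)
      | some ia, some ib =>
        if ia ≤ ib then (clans.modify ia (· ++ [b]), pos.insert b ia)
        else (clans.modify ib (· ++ [a]), pos.insert a ib)

def form_clans_alt (list_of_pairs : List (List Int)) : List (List Int) :=
  (list_of_pairs.foldl pvB_step ([], PySem.Dict.empty)).1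

-- ===== PRECONDITION & SPEC =====
-- Pre_ excludes exactly the inputs on which Python A raises IndexError: an inner list that is empty,
-- or of length 1 with a nonzero first entry (then A evaluates pair[1]).
def Pre_form_clans (list_of_pairs : List (List Int)) : Prop :=
  ∀ pair ∈ list_of_pairs, 2 ≤ pair.length ∨ (pair.length = 1 ∧ pair.getD 0 0 = 0)
instance (list_of_pairs : List (List Int)) : Decidable (Pre_form_clans list_of_pairs) := by
  unfold Pre_form_clans; infer_instance

def pvWitness_form_clans : List (List Int) := [[1, 2], [2, 3], [0], [4, 5], [3, 9]]

def Spec_form_clans (list_of_pairs : List (List Int)) (out : List (List Int)) : Prop := out = form_clans_alt list_of_pairs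
instance (list_of_pairs : List (List Int)) (out : List (List Int)) : Decidable (Spec_form_clans list_of_pairs out) := by unfold Spec_form_clans; infer_instance

-- ===== CLAIM (what is proved, stated in full; the proofs are below) =====
def Claim_equal_form_clans : Prop := ∀ (list_of_pairs : List (List Int)), Dom_form_clans list_of_pairs → Pre_form_clans list_of_pairs → Spec_form_clans list_of_pairs (form_clans list_of_pairs)

-- ===== LEMMAS AND PROOFS =====

-- the per-pair effect of A's second loop, once the counter i is past 0
def pvStepA (clans : List (List Int)) (pair : List Int) : List (List Int) :=
  let a := (PySem.List.pyGet? pair 0).getD 0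
  if a == 0 then clans
  else
    let b := (PySem.List.pyGet? pair 1).getD 0
    if b == 0 then clans
    else pvA_place a b clans

-- invariant tying B's dictionary to A's clans: pos is exactly the first-clan-index map
def pvInv (clans : List (List Int)) (pos : PySem.Dict Int Nat) : Prop :=
  ∀ x : Int, pos.get? x = List.findIdx? (fun c => decide (x ∈ c)) clans

lemma pvA_loop_one (l : List (List Int)) :
    ∀ clans, pvA_loop 1 clans l = l.foldl pvStepA clans := by
  induction l with
  | nil => intro clans; rfl
  | cons pair rest ih =>
    intro clans
    simp only [pvA_loop, pvStepA, List.foldl_cons]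
    split_ifs <;> simp_all

lemma pvA_whole (l : List (List Int)) :
    pvA_loop 0 (pvA_first l) l = l.foldl pvStepA [] := by
  induction l with
  | nil => rfl
  | cons pair rest ih =>
    by_cases h1 : ((PySem.List.pyGet? pair 0).getD 0) == 0
    · simp only [pvA_first, pvA_loop, pvStepA, List.foldl_cons, h1, if_true]
      exact ih
    · by_cases h2 : ((PySem.List.pyGet? pair 1).getD 0) == 0
      · simp only [pvA_first, pvA_loop, pvStepA, List.foldl_cons, h1, h2, if_true,
          Bool.false_eq_true, if_false]
        exact ih
      · simp only [pvA_first, pvA_loop, pvStepA, pvA_place, List.foldl_cons, h1, h2,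
          Bool.false_eq_true, if_false]
        norm_num
        exact pvA_loop_one rest _

lemma place_none {a b : Int} {clans : List (List Int)}
    (ha : ∀ clan ∈ clans, a ∉ clan) (hb : ∀ clan ∈ clans, b ∉ clan) :
    pvA_place a b clans = clans ++ [[a, b]] := by
  induction clans with
  | nil => rfl
  | cons clan rest ih =>
    simp only [List.mem_cons, forall_eq_or_imp] at ha hb
    simp [pvA_place, ha.1, hb.1, ih ha.2 hb.2]

lemma place_a {a b : Int} : ∀ (clans : List (List Int)) (ia : Nat),
    List.findIdx? (fun c => decide (a ∈ c)) clans = some ia →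
    (∀ ib, List.findIdx? (fun c => decide (b ∈ c)) clans = some ib → ia ≤ ib) →
    pvA_place a b clans = clans.modify ia (· ++ [b]) := by
  intro clans
  induction clans with
  | nil => intro ia h _; simp at h
  | cons clan rest ih =>
    intro ia h hmin
    rw [List.findIdx?_cons] at h
    by_cases hca : a ∈ clan
    · simp [hca] at h
      subst h
      simp [pvA_place, hca, List.modify]
    · simp [hca] at h
      obtain ⟨j, hj, rfl⟩ := h
      by_cases hcb : b ∈ clan
      · have := hmin 0 (by rw [List.findIdx?_cons]; simp [hcb])
        omega
      · have hmin' : ∀ ib, List.findIdx? (fun c => decide (b ∈ c)) rest = some ib → j ≤ ib := by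
          intro ib hib
          have := hmin (ib + 1) (by rw [List.findIdx?_cons]; simp [hcb, hib])
          omega
        simp [pvA_place, hca, hcb, List.modify, ih j hj hmin']

lemma place_b {a b : Int} : ∀ (clans : List (List Int)) (ib : Nat),
    List.findIdx? (fun c => decide (b ∈ c)) clans = some ib →
    (∀ ia, List.findIdx? (fun c => decide (a ∈ c)) clans = some ia → ib < ia) →
    pvA_place a b clans = clans.modify ib (· ++ [a]) := by
  intro clans
  induction clans with
  | nil => intro ib h _; simp at h
  | cons clan rest ih =>
    intro ib h hmin
    rw [List.findIdx?_cons] at h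
    by_cases hca : a ∈ clan
    · have := hmin 0 (by rw [List.findIdx?_cons]; simp [hca])
      omega
    · by_cases hcb : b ∈ clan
      · simp [hcb] at h
        subst h
        simp [pvA_place, hca, hcb, List.modify]
      · simp [hcb] at h
        obtain ⟨j, hj, rfl⟩ := h
        have hmin' : ∀ ia, List.findIdx? (fun c => decide (a ∈ c)) rest = some ia → j < ia := by
          intro ia hia
          have := hmin (ia + 1) (by rw [List.findIdx?_cons]; simp [hca, hia])
          omega
        simp [pvA_place, hca, hcb, List.modify, ih j hj hmin']

lemma findIdx?_modify_self {w : Int} : ∀ (clans : List (List Int)) (j : Nat),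
    j < clans.length →
    (∀ iw, List.findIdx? (fun c => decide (w ∈ c)) clans = some iw → j ≤ iw) →
    List.findIdx? (fun c => decide (w ∈ c)) (clans.modify j (· ++ [w])) = some j := by
  intro clans
  induction clans with
  | nil => intro j hj _; simp at hj
  | cons clan rest ih =>
    intro j hj hmin
    match j with
    | 0 => simp [List.modify, List.findIdx?_cons]
    | k + 1 =>
      by_cases hcw : w ∈ clan
      · have := hmin 0 (by rw [List.findIdx?_cons]; simp [hcw])
        omega
      · have hmin' : ∀ iw, List.findIdx? (fun c => decide (w ∈ c)) rest = some iw → k ≤ iw := by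
          intro iw hiw
          have := hmin (iw + 1) (by rw [List.findIdx?_cons]; simp [hcw, hiw])
          omega
        have hk : k < rest.length := by simp at hj; omega
        rw [List.modify_succ_cons, List.findIdx?_cons, if_neg (by simpa using hcw), ih k hk hmin']
        rfl

lemma findIdx?_modify_other {x w : Int} (hx : x ≠ w) : ∀ (clans : List (List Int)) (j : Nat),
    List.findIdx? (fun c => decide (x ∈ c)) (clans.modify j (· ++ [w])) =
      List.findIdx? (fun c => decide (x ∈ c)) clans := by
  intro clans
  induction clans with
  | nil => intro j; rw [List.modify_nil]
  | cons clan rest ih =>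
    intro j
    match j with
    | 0 =>
      rw [List.modify_zero_cons, List.findIdx?_cons, List.findIdx?_cons]
      simp [hx]
    | k + 1 =>
      rw [List.modify_succ_cons, List.findIdx?_cons, List.findIdx?_cons, ih k]

lemma inv_new {a b : Int} {clans : List (List Int)} {pos : PySem.Dict Int Nat}
    (hInv : pvInv clans pos)
    (ha : List.findIdx? (fun c => decide (a ∈ c)) clans = none)
    (hb : List.findIdx? (fun c => decide (b ∈ c)) clans = none) :
    pvInv (clans ++ [[a, b]]) ((pos.insert a clans.length).insert b clans.length) := by
  intro x
  rw [List.findIdx?_append]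
  by_cases hxb : x = b
  · subst hxb
    rw [PySem.Dict.get?_insert_self, hb]
    simp [List.findIdx?_cons]
  · rw [PySem.Dict.get?_insert_of_ne _ _ hxb]
    by_cases hxa : x = a
    · subst hxa
      rw [PySem.Dict.get?_insert_self, ha]
      simp [List.findIdx?_cons]
    · rw [PySem.Dict.get?_insert_of_ne _ _ hxa, hInv x]
      cases hfx : List.findIdx? (fun c => decide (x ∈ c)) clans with
      | some j => simp
      | none => simp [List.findIdx?_cons, hxa, hxb]

lemma inv_mod {w : Int} {clans : List (List Int)} {pos : PySem.Dict Int Nat} {j : Nat}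
    (hInv : pvInv clans pos) (hj : j < clans.length)
    (hw : ∀ iw, List.findIdx? (fun c => decide (w ∈ c)) clans = some iw → j ≤ iw) :
    pvInv (clans.modify j (· ++ [w])) (pos.insert w j) := by
  intro x
  by_cases hxw : x = w
  · subst hxw
    rw [PySem.Dict.get?_insert_self, findIdx?_modify_self clans j hj hw]
  · rw [PySem.Dict.get?_insert_of_ne _ _ hxw, findIdx?_modify_other hxw clans j, hInv x]

lemma idx_lt {x : Int} {clans : List (List Int)} {i : Nat}
    (h : List.findIdx? (fun c => decide (x ∈ c)) clans = some i) : i < clans.length :=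
  (List.findIdx?_eq_some_iff_findIdx_eq.mp h).1

lemma step_sim (pair : List Int) (clans : List (List Int)) (pos : PySem.Dict Int Nat)
    (hInv : pvInv clans pos) :
    (pvB_step (clans, pos) pair).1 = pvStepA clans pair ∧
      pvInv (pvB_step (clans, pos) pair).1 (pvB_step (clans, pos) pair).2 := by
  by_cases h1 : ((PySem.List.pyGet? pair 0).getD 0) == 0
  · simp only [pvB_step, pvStepA, h1, if_true]
    exact ⟨trivial, hInv⟩
  · by_cases h2 : ((PySem.List.pyGet? pair 1).getD 0) == 0
    · simp only [pvB_step, pvStepA, h1, h2, if_true, Bool.false_eq_true, if_false]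
      exact ⟨trivial, hInv⟩
    · simp only [pvB_step, pvStepA, h1, h2, Bool.false_eq_true, if_false]
      have hga := hInv ((PySem.List.pyGet? pair 0).getD 0)
      have hgb := hInv ((PySem.List.pyGet? pair 1).getD 0)
      cases hfa : List.findIdx? (fun c => decide ((PySem.List.pyGet? pair 0).getD 0 ∈ c)) clans with
      | none =>
        cases hfb : List.findIdx? (fun c => decide ((PySem.List.pyGet? pair 1).getD 0 ∈ c)) clans with
        | none =>
          rw [hfa] at hga; rw [hfb] at hgb
          simp only [hga, hgb]
          refine ⟨?_, inv_new hInv hfa hfb⟩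
          exact (place_none (by simpa [List.findIdx?_eq_none_iff] using hfa)
            (by simpa [List.findIdx?_eq_none_iff] using hfb)).symm
        | some ib =>
          rw [hfa] at hga; rw [hfb] at hgb
          simp only [hga, hgb]
          refine ⟨(place_b clans ib hfb (fun ia hia => by rw [hfa] at hia; cases hia)).symm, ?_⟩
          exact inv_mod hInv (idx_lt hfb) (fun iw hiw => by rw [hfa] at hiw; cases hiw)
      | some ia =>
        cases hfb : List.findIdx? (fun c => decide ((PySem.List.pyGet? pair 1).getD 0 ∈ c)) clans with
        | none =>
          rw [hfa] at hga; rw [hfb] at hgb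
          simp only [hga, hgb]
          refine ⟨(place_a clans ia hfa (fun ib hib => by rw [hfb] at hib; cases hib)).symm, ?_⟩
          exact inv_mod hInv (idx_lt hfa) (fun iw hiw => by rw [hfb] at hiw; cases hiw)
        | some ib =>
          rw [hfa] at hga; rw [hfb] at hgb
          simp only [hga, hgb]
          by_cases hle : ia ≤ ib
          · simp only [hle, if_true]
            refine ⟨(place_a clans ia hfa (fun ib' hib' => by
              rw [hfb] at hib'; cases hib'; exact hle)).symm, ?_⟩
            exact inv_mod hInv (idx_lt hfa) (fun iw hiw => by
              rw [hfb] at hiw; cases hiw; exact hle)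
          · simp only [hle, if_false]
            have hlt : ib < ia := by omega
            refine ⟨(place_b clans ib hfb (fun ia' hia' => by
              rw [hfa] at hia'; cases hia'; exact hlt)).symm, ?_⟩
            exact inv_mod hInv (idx_lt hfb) (fun iw hiw => by
              rw [hfa] at hiw; cases hiw; omega)

lemma pvB_whole (l : List (List Int)) :
    ∀ clans pos, pvInv clans pos →
      (l.foldl pvB_step (clans, pos)).1 = l.foldl pvStepA clans := by
  induction l with
  | nil => intro clans pos _; rfl
  | cons pair rest ih =>
    intro clans pos hInv
    obtain ⟨h1, h2⟩ := step_sim pair clans pos hInv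
    simp only [List.foldl_cons]
    have := ih (pvB_step (clans, pos) pair).1 (pvB_step (clans, pos) pair).2 h2
    rw [← h1]
    exact this

-- ===== VERDICT (by name: the statement is the Claim_ definition above) =====
theorem form_clans_spec : Claim_equal_form_clans := by
  intro l _ _
  unfold Spec_form_clans form_clans form_clans_alt
  have hB := pvB_whole l [] PySem.Dict.empty (by intro x; simp)
  rw [hB]
  by_cases h : l.length ≠ 0
  · simp only [if_pos h, pvA_whole]
  · simp only [if_neg h]
    have : l = [] := by simpa using h
    subst this; rfl
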